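-- pv_equiv track=rewrite | github.com/Choupette007/SOLOTradingBot | solana_trading_bot_bundle/trading_bot/eligibility.py | _primary_category_list
-- ===== SOURCE A (Python) =====
-- from typing import Any, Dict, List, Optional, Set, Tuple
--
-- def _primary_category_list(categories: List[str]) -> List[str]:
--     """
--     Reduce any list of category tags to a single primary tag.
--     Precedence: newly_launched > large_cap > mid_cap > low_cap > unknown_cap
--     """
--     s = {c.strip().lower() for c in categories or []}
--     if "newly_launched" in s:
--         return ["newly_launched"]
--     if "large_cap" in s:
--         return ["large_cap"]
--     if "mid_cap" in s:
--         return ["mid_cap"]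
--     if "low_cap" in s:
--         return ["low_cap"]
--     return ["unknown_cap"] if s else ["unknown_cap"]
-- ===== SOURCE B (Python) =====
-- def _primary_category_list(categories):
--     """Single short-circuiting scan over the raw list (no intermediate set):
--     track the best tag seen so far and break early on the top-priority tag."""
--     PRIO = {"newly_launched": 4, "large_cap": 3, "mid_cap": 2, "low_cap": 1}
--     best, best_p = "unknown_cap", 0
--     for c in categories or []:
--         t = c.strip().lower()
--         p = PRIO.get(t, 0)
--         if p > best_p:
--             best, best_p = t, p
--             if p == 4:
--                 break
--     return [best]
-- ===== Notes on version B (the rewrite author's own statement) =====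
-- stated objective: alternative
-- what changed: Instead of building a normalized set and testing it with an if-ladder, B makes one short-circuiting pass over the raw list with a best-tag-so-far accumulator, breaking early when the top-priority tag appears and never materializing the set.
import Mathlib
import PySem

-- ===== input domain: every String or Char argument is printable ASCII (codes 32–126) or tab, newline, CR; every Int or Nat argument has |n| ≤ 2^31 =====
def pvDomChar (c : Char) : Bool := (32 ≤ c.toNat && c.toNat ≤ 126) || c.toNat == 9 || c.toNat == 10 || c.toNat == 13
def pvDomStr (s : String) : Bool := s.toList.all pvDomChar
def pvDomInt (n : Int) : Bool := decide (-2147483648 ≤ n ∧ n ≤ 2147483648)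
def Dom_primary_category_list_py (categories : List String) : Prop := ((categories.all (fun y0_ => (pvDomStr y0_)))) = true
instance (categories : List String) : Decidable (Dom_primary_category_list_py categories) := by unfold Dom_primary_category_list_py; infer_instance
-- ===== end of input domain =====

-- B replaces A's build-a-set-then-if-ladder by one short-circuiting scan with a best-so-far accumulator (objective: alternative, same cost).

-- ===== PORT A =====
def primary_category_list_py (categories : List String) : List String :=
  let s : PySem.Set String :=
    PySem.Set.ofList (categories.map (fun c => PySem.Str.lower (PySem.Str.strip c)))
  if s.contains "newly_launched" then ["newly_launched"]
  else if s.contains "large_cap" then ["large_cap"]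
  else if s.contains "mid_cap" then ["mid_cap"]
  else if s.contains "low_cap" then ["low_cap"]
  else if ¬ s.isEmpty then ["unknown_cap"] else ["unknown_cap"]  -- 'return ["unknown_cap"] if s else ["unknown_cap"]'

-- ===== PORT B =====
-- c.strip().lower() of Source B
def pvNorm (c : String) : String := PySem.Str.lower (PySem.Str.strip c)

-- PRIO dict of Source B (literal keys, so an if-chain is its .get(t, 0))
def pvPrio (c : String) : Nat :=
  if c = "newly_launched" then 4
  else if c = "large_cap" then 3
  else if c = "mid_cap" then 2
  else if c = "low_cap" then 1 else 0

-- the for-loop of Source B with its early 'break' on p == 4, as structural recursion over the list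
def pvScan : List String → String → Nat → String
  | [], best, _ => best
  | c :: rest, best, best_p =>
    -- t = c.strip().lower(); p = PRIO.get(t, 0)
    if pvPrio (pvNorm c) > best_p then
      if pvPrio (pvNorm c) = 4 then pvNorm c
      else pvScan rest (pvNorm c) (pvPrio (pvNorm c))
    else pvScan rest best best_p

def primary_category_list_py_alt (categories : List String) : List String :=
  [pvScan categories "unknown_cap" 0]

-- ===== PRECONDITION & SPEC =====
def Spec_primary_category_list_py (categories : List String) (out : List String) : Prop := out = primary_category_list_py_alt categories
instance (categories : List String) (out : List String) : Decidable (Spec_primary_category_list_py categories out) := by unfold Spec_primary_category_list_py; infer_instance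

-- ===== CLAIM (what is proved, stated in full; the proofs are below) =====
def Claim_equal_primary_category_list_py : Prop := ∀ (categories : List String), Dom_primary_category_list_py categories → Spec_primary_category_list_py categories (primary_category_list_py categories)

-- ===== LEMMAS AND PROOFS =====

-- canonical name of each priority level
def pvName : Nat → String
  | 4 => "newly_launched"
  | 3 => "large_cap"
  | 2 => "mid_cap"
  | 1 => "low_cap"
  | _ => "unknown_cap"

-- maximal priority of the normalized tags of a list
def pvMaxP : List String → Nat
  | [] => 0
  | c :: t => max (pvPrio (pvNorm c)) (pvMaxP t)

lemma pvPrio_le (c : String) : pvPrio c ≤ 4 := by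
  unfold pvPrio; split_ifs <;> omega

lemma pvMaxP_le (l : List String) : pvMaxP l ≤ 4 := by
  induction l with
  | nil => simp [pvMaxP]
  | cons c t ih => simp only [pvMaxP]; have := pvPrio_le (pvNorm c); omega

lemma pvPrio_pos_name (c : String) (h : 0 < pvPrio c) : c = pvName (pvPrio c) := by
  unfold pvPrio at *
  split_ifs at * <;> simp_all [pvName]

-- the scan returns the canonical name of the best priority seen
lemma pvScan_eq (l : List String) (bp : Nat) (hbp : bp ≤ 4) :
    pvScan l (pvName bp) bp = pvName (max bp (pvMaxP l)) := by
  induction l generalizing bp with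
  | nil => simp [pvScan, pvMaxP]
  | cons c t ih =>
    simp only [pvScan, pvMaxP]
    have hmle := pvMaxP_le t
    set p := pvPrio (pvNorm c) with hp
    set n := pvNorm c with hnn
    have hple : p ≤ 4 := by rw [hp]; exact pvPrio_le n
    by_cases hgt : p > bp
    · have hpos : 0 < p := by omega
      have hn : n = pvName p := by
        rw [hp] at hpos ⊢; exact pvPrio_pos_name n hpos
      rw [if_pos hgt]
      by_cases h4 : p = 4
      · rw [if_pos h4, hn]
        have e : max bp (max p (pvMaxP t)) = p := by omega
        rw [e]
      · rw [if_neg h4, hn, ih p hple]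
        have e : max bp (max p (pvMaxP t)) = max p (pvMaxP t) := by omega
        rw [e]
    · rw [if_neg hgt, ih bp hbp]
      have e : max bp (max p (pvMaxP t)) = max bp (pvMaxP t) := by omega
      rw [e]

-- every normalized tag's priority is bounded by the max
lemma pvMaxP_ub (l : List String) (x : String) (hx : x ∈ l.map pvNorm) :
    pvPrio x ≤ pvMaxP l := by
  induction l with
  | nil => simp at hx
  | cons c t ih =>
    simp only [List.map_cons, List.mem_cons] at hx
    simp only [pvMaxP]
    rcases hx with h | h
    · rw [h]; omega
    · have := ih h; omega

-- a positive max is attained by some normalized tag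
lemma pvMaxP_attained (l : List String) (h : 0 < pvMaxP l) :
    pvName (pvMaxP l) ∈ l.map pvNorm := by
  induction l with
  | nil => simp [pvMaxP] at h
  | cons c t ih =>
    simp only [pvMaxP] at h ⊢
    simp only [List.map_cons, List.mem_cons]
    by_cases hc : pvMaxP t ≤ pvPrio (pvNorm c)
    · left
      rw [Nat.max_eq_left hc]
      exact (pvPrio_pos_name (pvNorm c) (by omega)).symm
    · right
      rw [Nat.max_eq_right (by omega)]
      exact ih (by omega)

-- ===== VERDICT (by name: the statement is the Claim_ definition above) =====
theorem primary_category_list_py_spec : Claim_equal_primary_category_list_py := by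
  unfold Claim_equal_primary_category_list_py Spec_primary_category_list_py
  intro categories _
  unfold primary_category_list_py primary_category_list_py_alt
  dsimp only
  have h0 : pvName 0 = "unknown_cap" := rfl
  rw [← h0, pvScan_eq categories 0 (by omega), Nat.zero_max]
  have hub := pvMaxP_ub categories
  have hat := pvMaxP_attained categories
  have hle := pvMaxP_le categories
  -- each 'tag ∈ s' of A decides the value of pvMaxP and vice versa
  have e4 : "newly_launched" ∈ categories.map pvNorm ↔ pvMaxP categories = 4 := by
    constructor
    · intro h; have := hub _ h; simp [pvPrio] at this; omega
    · intro h; have := hat (by omega); rwa [h] at this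
  have e3 : "large_cap" ∈ categories.map pvNorm → 3 ≤ pvMaxP categories := by
    intro h; have := hub _ h; simpa [pvPrio] using this
  have e2 : "mid_cap" ∈ categories.map pvNorm → 2 ≤ pvMaxP categories := by
    intro h; have := hub _ h; simpa [pvPrio] using this
  have e1 : "low_cap" ∈ categories.map pvNorm → 1 ≤ pvMaxP categories := by
    intro h; have := hub _ h; simpa [pvPrio] using this
  have key : ∀ k, pvMaxP categories = k → k ≤ 4 →
      (if "newly_launched" ∈ categories.map pvNorm then ["newly_launched"]
       else if "large_cap" ∈ categories.map pvNorm then ["large_cap"]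
       else if "mid_cap" ∈ categories.map pvNorm then ["mid_cap"]
       else if "low_cap" ∈ categories.map pvNorm then ["low_cap"]
       else ["unknown_cap"]) = [pvName k] := by
    intro k hk hk4
    have n4 : pvMaxP categories ≠ 4 → "newly_launched" ∉ categories.map pvNorm := by
      intro h hm; exact h (e4.mp hm)
    interval_cases k
    · rw [if_neg (n4 (by omega)), if_neg (fun h => by have := e3 h; omega),
         if_neg (fun h => by have := e2 h; omega), if_neg (fun h => by have := e1 h; omega)]
      rfl
    · have hm : "low_cap" ∈ categories.map pvNorm := by
        have := hat (by omega); rw [hk] at this; exact this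
      rw [if_neg (n4 (by omega)), if_neg (fun h => by have := e3 h; omega),
         if_neg (fun h => by have := e2 h; omega), if_pos hm]
      rfl
    · have hm : "mid_cap" ∈ categories.map pvNorm := by
        have := hat (by omega); rw [hk] at this; exact this
      rw [if_neg (n4 (by omega)), if_neg (fun h => by have := e3 h; omega), if_pos hm]
      rfl
    · have hm : "large_cap" ∈ categories.map pvNorm := by
        have := hat (by omega); rw [hk] at this; exact this
      rw [if_neg (n4 (by omega)), if_pos hm]
      rfl
    · rw [if_pos (e4.mpr hk)]
      rfl
  have := key (pvMaxP categories) rfl hle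
  -- A's set-membership tests are exactly membership of the normalized list
  simpa [PySem.Set.contains, PySem.Set.mem_ofList, List.mem_map, pvNorm] using this
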